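-- pv_equiv track=rewrite | github.com/nathanbronson/Skyground | api_utils.py | get_mask
-- ===== SOURCE A (Python) =====
-- def get_mask(oob):
--     m = []
--     cur = True
--     for i in oob:
--         if cur is None:
--             m.append(False)
--             continue
--         if cur:
--             if i:
--                 m.append(False)
--             else:
--                 cur = False
--                 m.append(True)
--         else:
--             if i:
--                 cur = None
--                 m.append(False)
--             else:
--                 m.append(True)
--     return m
-- ===== SOURCE B (Python) =====
-- def get_mask(oob):
--     n = len(oob)
--     start = 0
--     while start < n and oob[start]:
--         start += 1
--     if start == n:
--         return [False] * n
--     end = start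
--     while end < n and not oob[end]:
--         end += 1
--     return [False] * start + [True] * (end - start) + [False] * (n - end)
-- ===== Notes on version B (the rewrite author's own statement) =====
-- stated objective: simpler
-- what changed: Replaces the per-element three-state machine with boundary finding: locate the first falsy index and the end of the falsy run, then build the mask from three replicated segments.
import Mathlib
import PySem

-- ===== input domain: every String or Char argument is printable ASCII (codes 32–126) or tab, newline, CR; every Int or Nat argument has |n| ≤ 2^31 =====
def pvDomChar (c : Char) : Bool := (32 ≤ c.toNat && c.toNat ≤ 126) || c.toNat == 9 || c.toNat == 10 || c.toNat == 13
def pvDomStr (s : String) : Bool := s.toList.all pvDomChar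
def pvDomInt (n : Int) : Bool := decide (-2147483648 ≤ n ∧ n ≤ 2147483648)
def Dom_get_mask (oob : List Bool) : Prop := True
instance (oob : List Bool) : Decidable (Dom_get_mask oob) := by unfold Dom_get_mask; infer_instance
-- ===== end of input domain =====

-- B replaces A's per-element three-state machine with boundary finding plus three replicated
-- segments; objective: simpler construction, same O(n) cost.

-- ===== PORT A =====
-- A's loop body: state is (m, cur) with cur ∈ {some true, some false, none} as in the Python.
def gmStep (st : List Bool × Option Bool) (i : Bool) : List Bool × Option Bool :=
  match st.2 with
  | none => (st.1 ++ [false], none)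
  | some true => if i then (st.1 ++ [false], some true) else (st.1 ++ [true], some false)
  | some false => if i then (st.1 ++ [false], none) else (st.1 ++ [true], some false)

def get_mask (oob : List Bool) : List Bool :=
  (oob.foldl gmStep ([], some true)).1

-- ===== PORT B =====
-- first while loop of Source B: number of leading truthy elements (the index `start`)
def gmStart : List Bool → Nat
  | [] => 0
  | b :: t => if b then gmStart t + 1 else 0

-- second while loop of Source B: length of the falsy run from `start` (end - start)
def gmRun : List Bool → Nat
  | [] => 0
  | b :: t => if b then 0 else gmRun t + 1

def get_mask_alt (oob : List Bool) : List Bool :=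
  let n := oob.length
  let start := gmStart oob
  if start = n then List.replicate n false
  else
    let run := gmRun (oob.drop start)
    List.replicate start false ++ List.replicate run true ++
      List.replicate (n - (start + run)) false

-- ===== PRECONDITION & SPEC =====
def Spec_get_mask (oob : List Bool) (out : List Bool) : Prop := out = get_mask_alt oob
instance (oob : List Bool) (out : List Bool) : Decidable (Spec_get_mask oob out) := by unfold Spec_get_mask; infer_instance

-- ===== CLAIM (what is proved, stated in full; the proofs are below) =====
def Claim_equal_get_mask : Prop := ∀ (oob : List Bool), Dom_get_mask oob → Spec_get_mask oob (get_mask oob)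

-- ===== LEMMAS AND PROOFS =====

theorem gmLoop_none (l : List Bool) (m : List Bool) :
    (l.foldl gmStep (m, none)).1 = m ++ List.replicate l.length false := by
  induction l generalizing m with
  | nil => simp
  | cons i t ih =>
    simp only [List.foldl_cons, gmStep, List.length_cons, List.replicate_succ]
    rw [ih]
    simp

theorem gmLoop_false (l : List Bool) (m : List Bool) :
    (l.foldl gmStep (m, some false)).1 =
      m ++ List.replicate (gmRun l) true ++ List.replicate (l.length - gmRun l) false := by
  induction l generalizing m with
  | nil => simp [gmRun]
  | cons i t ih =>
    cases i with
    | true =>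
      simp only [List.foldl_cons, gmStep, if_true, gmRun, List.length_cons]
      rw [gmLoop_none]
      simp [List.replicate_succ, List.append_assoc]
    | false =>
      simp only [List.foldl_cons, gmStep, Bool.false_eq_true, if_false, gmRun, List.length_cons]
      rw [ih]
      simp [List.replicate_succ, List.append_assoc, Nat.succ_sub_succ]

theorem gmLoop_true (l : List Bool) (m : List Bool) :
    (l.foldl gmStep (m, some true)).1 =
      m ++ List.replicate (gmStart l) false
        ++ List.replicate (gmRun (l.drop (gmStart l))) true
        ++ List.replicate (l.length - (gmStart l + gmRun (l.drop (gmStart l)))) false := by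
  induction l generalizing m with
  | nil => simp [gmStart, gmRun]
  | cons i t ih =>
    cases i with
    | true =>
      simp only [List.foldl_cons, gmStep, if_true, gmStart, List.length_cons, List.drop_succ_cons]
      rw [ih]
      simp [List.replicate_succ, List.append_assoc, Nat.succ_sub_succ, Nat.succ_add]
    | false =>
      simp only [List.foldl_cons, gmStep, Bool.false_eq_true, if_false, gmStart, gmRun,
        List.length_cons, List.drop_zero, Nat.zero_add]
      rw [gmLoop_false]
      simp [List.replicate_succ, List.append_assoc, Nat.succ_sub_succ]

-- ===== VERDICT (by name: the statement is the Claim_ definition above) =====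
theorem get_mask_spec : Claim_equal_get_mask := by
  intro oob _
  unfold Spec_get_mask get_mask get_mask_alt
  rw [gmLoop_true]
  by_cases h : gmStart oob = oob.length
  · have hd : oob.drop (gmStart oob) = [] := by
      rw [h]; simp
    rw [hd]
    simp [h, gmRun]
  · simp [h]
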